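-- pv_equiv track=rewrite | github.com/Stratio/genai-agents | shared-skills/pdf-reader/scripts/quick_extract.py | promote_headings
-- ===== SOURCE A (Python) =====
-- def promote_headings(text: str) -> str:
--     """
--     Promote likely heading lines to Markdown '### ' headings.
--
--     Heuristic: a line is a heading when it is standalone (surrounded by
--     blank lines or doc boundaries), short (<= 80 chars), doesn't end in
--     sentence punctuation, and looks like a title (Title Case or ALL CAPS
--     with at least one letter).
--
--     Known limitation: promotes false positives on short prose lines like
--     'Yours Sincerely' or 'Table of Contents'. Heuristic, not semantic.
--     """
--     lines = text.split("\n")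
--     out: list[str] = []
--     for i, line in enumerate(lines):
--         stripped = line.strip()
--         if not stripped:
--             out.append(line)
--             continue
--
--         prev_blank = i == 0 or not lines[i - 1].strip()
--         next_blank = i == len(lines) - 1 or not lines[i + 1].strip()
--         last_char = stripped[-1]
--
--         has_letter = any(c.isalpha() for c in stripped)
--         looks_like_heading = (
--             prev_blank
--             and next_blank
--             and len(stripped) <= 80
--             and last_char not in ".,:;"
--             and has_letter
--             and (stripped.istitle() or stripped.isupper())
--             and not stripped.startswith("#")
--         )
--         out.append(f"### {stripped}" if looks_like_heading else line)
--     return "\n".join(out)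
-- ===== SOURCE B (Python) =====
-- def _heading(stripped: str) -> str | None:
--     """Return the promoted heading for a standalone line, or None if it does not qualify."""
--     if (
--         len(stripped) <= 80
--         and stripped[-1] not in ".,:;"
--         and any(c.isalpha() for c in stripped)
--         and (stripped.istitle() or stripped.isupper())
--         and not stripped.startswith("#")
--     ):
--         return "### " + stripped
--     return None
--
--
-- def promote_headings(text: str) -> str:
--     # Block-segmentation pass: split into maximal runs of consecutive non-blank
--     # lines; only a run of length exactly 1 is a candidate for promotion.
--     lines = text.split("\n")
--     n = len(lines)
--     out: list[str] = []
--     i = 0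
--     while i < n:
--         if not lines[i].strip():
--             out.append(lines[i])
--             i += 1
--             continue
--         j = i
--         while j < n and lines[j].strip():
--             j += 1
--         if j - i == 1:
--             h = _heading(lines[i].strip())
--             out.append(h if h is not None else lines[i])
--         else:
--             out.extend(lines[i:j])
--         i = j
--     return "\n".join(out)
-- ===== Notes on version B (the rewrite author's own statement) =====
-- stated objective: alternative
-- what changed: B splits the text into lines once and partitions them into maximal runs of consecutive non-blank lines, promoting only runs of length exactly one, instead of A's per-line loop with index-based neighbour (lines[i-1]/lines[i+1]) blankness checks.
import Mathlib
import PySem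

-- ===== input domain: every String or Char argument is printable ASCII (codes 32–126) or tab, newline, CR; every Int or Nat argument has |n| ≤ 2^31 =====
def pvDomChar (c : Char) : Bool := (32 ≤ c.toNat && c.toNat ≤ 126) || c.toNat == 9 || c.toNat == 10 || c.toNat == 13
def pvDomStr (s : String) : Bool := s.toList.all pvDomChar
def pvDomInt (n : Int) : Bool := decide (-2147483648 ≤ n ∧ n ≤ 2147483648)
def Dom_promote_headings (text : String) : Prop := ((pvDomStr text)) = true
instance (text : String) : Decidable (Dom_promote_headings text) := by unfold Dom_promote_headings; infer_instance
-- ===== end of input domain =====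

-- B re-implements A by segmenting the lines into maximal non-blank runs (only a run of
-- length one is a promotion candidate) instead of per-line neighbour index checks; same
-- return value, objective: alternative decomposition.

-- shared leaf helpers (the per-line heading test, identical prose in both Pythons)

-- str.istitle, hand-ported (exact on ASCII, where cased = alphabetic): fold with state
-- (prevCased, ok, hasCased)
def istitleStep (st : Bool × Bool × Bool) (c : Char) : Bool × Bool × Bool :=
  if PySem.Chars.isupper c then (true, st.2.1 && !st.1, true)
  else if PySem.Chars.islower c then (true, st.2.1 && st.1, true)
  else (false, st.2.1, st.2.2)

def istitlePy (s : List Char) : Bool :=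
  let st := s.foldl istitleStep (false, true, false)
  st.2.1 && st.2.2

-- str.isupper, hand-ported (exact on ASCII): at least one cased char, none lowercase
def isupperPy (s : List Char) : Bool :=
  s.any PySem.Chars.isalpha && !(s.any PySem.Chars.islower)

-- the heading test on the stripped line: len<=80, last char not in ".,:;" (single-char
-- 'in' on a string = char membership), has a letter, istitle or isupper, not '#'-prefixed
def headTest (s : List Char) : Bool :=
  decide (s.length ≤ 80) && !(['.', ',', ':', ';'].contains (s.getLastD ' ')) &&
  s.any PySem.Chars.isalpha && (istitlePy s || isupperPy s) &&
  !(PySem.Chars.startswith s ['#'])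

-- ===== PORT A =====
-- index-based loop over enumerate(lines); lines[i-1]/lines[i+1] accesses are guarded by
-- the short-circuit ||, so pyGetD with a dummy default is exact
def promote_headings (text : String) : String :=
  let lines := PySem.Chars.splitOn text.toList ['\n']
  let out := (PySem.List.enumerate lines).foldl (fun out p =>
    let i := p.1
    let line := p.2
    let stripped := PySem.Chars.strip line
    if stripped.isEmpty then out ++ [line]
    else
      let prevBlank := (i == 0) || (PySem.Chars.strip (PySem.List.pyGetD lines (i - 1) [])).isEmpty
      let nextBlank := (i == (lines.length : Int) - 1) || (PySem.Chars.strip (PySem.List.pyGetD lines (i + 1) [])).isEmpty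
      out ++ [if prevBlank && nextBlank && headTest stripped then '#' :: '#' :: '#' :: ' ' :: stripped else line]) []
  String.mk (PySem.Chars.join ['\n'] out)

-- ===== PORT B =====
def pvNonblank (l : List Char) : Bool := !(PySem.Chars.strip l).isEmpty

-- Source B's _heading helper: the promoted heading, or none if the line does not qualify
def headingOpt (s : List Char) : Option (List Char) :=
  if headTest s then some ('#' :: '#' :: '#' :: ' ' :: s) else none

-- Source B's main scan: blank lines pass through; a maximal non-blank run (Python's inner
-- j-loop + lines[i:j] = takeWhile/dropWhile) is promoted only when its length is 1
def goB : List (List Char) → List (List Char)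
  | [] => []
  | l :: rest =>
    if h : (PySem.Chars.strip l).isEmpty then l :: goB rest
    else
      let run := (l :: rest).takeWhile pvNonblank
      let rest' := (l :: rest).dropWhile pvNonblank
      (if run.length == 1 then
        [match headingOpt (PySem.Chars.strip l) with
         | some hd => hd
         | none => l]
       else run) ++ goB rest'
termination_by ls => ls.length
decreasing_by
  · simp
  · rw [List.dropWhile_cons_of_pos (by simp [pvNonblank, h])]
    exact Nat.lt_succ_of_le (List.length_dropWhile_le _ _)

def promote_headings_alt (text : String) : String :=
  String.mk (PySem.Chars.join ['\n'] (goB (PySem.Chars.splitOn text.toList ['\n'])))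

-- ===== PRECONDITION & SPEC =====
def Spec_promote_headings (text : String) (out : String) : Prop := out = promote_headings_alt text
instance (text : String) (out : String) : Decidable (Spec_promote_headings text out) := by unfold Spec_promote_headings; infer_instance

-- ===== CLAIM (what is proved, stated in full; the proofs are below) =====
def Claim_equal_promote_headings : Prop := ∀ (text : String), Dom_promote_headings text → Spec_promote_headings text (promote_headings text)

-- ===== LEMMAS AND PROOFS =====

-- the element A's fold appends for entry p of enumerate(lines)
def fA (lines : List (List Char)) (p : Int × List Char) : List Char :=
  let stripped := PySem.Chars.strip p.2
  if stripped.isEmpty then p.2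
  else
    let prevBlank := (p.1 == 0) || (PySem.Chars.strip (PySem.List.pyGetD lines (p.1 - 1) [])).isEmpty
    let nextBlank := (p.1 == (lines.length : Int) - 1) || (PySem.Chars.strip (PySem.List.pyGetD lines (p.1 + 1) [])).isEmpty
    if prevBlank && nextBlank && headTest stripped then '#' :: '#' :: '#' :: ' ' :: stripped else p.2

-- A as a structural two-state scan: prevB = "previous line blank or doc start",
-- one-line lookahead for nextB
def nextFlag : List (List Char) → Bool
  | [] => true
  | r :: _ => (PySem.Chars.strip r).isEmpty

def goA (prevB : Bool) : List (List Char) → List (List Char)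
  | [] => []
  | l :: rest =>
    let s := PySem.Chars.strip l
    if s.isEmpty then l :: goA true rest
    else
      (if prevB && nextFlag rest && headTest s then '#' :: '#' :: '#' :: ' ' :: s else l) :: goA false rest

lemma goA_cons (pB : Bool) (l : List Char) (rest : List (List Char)) :
    goA pB (l :: rest)
      = if (PySem.Chars.strip l).isEmpty then l :: goA true rest
        else (if pB && nextFlag rest && headTest (PySem.Chars.strip l)
              then '#' :: '#' :: '#' :: ' ' :: PySem.Chars.strip l else l) :: goA false rest := rfl

lemma foldA_eq (lines : List (List Char)) (L : List (Int × List Char)) (acc : List (List Char)) :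
    L.foldl (fun out p =>
      let i := p.1
      let line := p.2
      let stripped := PySem.Chars.strip line
      if stripped.isEmpty then out ++ [line]
      else
        let prevBlank := (i == 0) || (PySem.Chars.strip (PySem.List.pyGetD lines (i - 1) [])).isEmpty
        let nextBlank := (i == (lines.length : Int) - 1) || (PySem.Chars.strip (PySem.List.pyGetD lines (i + 1) [])).isEmpty
        out ++ [if prevBlank && nextBlank && headTest stripped then '#' :: '#' :: '#' :: ' ' :: stripped else line]) acc
    = acc ++ L.map (fA lines) := by
  have : (fun (out : List (List Char)) (p : Int × List Char) =>
      let i := p.1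
      let line := p.2
      let stripped := PySem.Chars.strip line
      if stripped.isEmpty then out ++ [line]
      else
        let prevBlank := (i == 0) || (PySem.Chars.strip (PySem.List.pyGetD lines (i - 1) [])).isEmpty
        let nextBlank := (i == (lines.length : Int) - 1) || (PySem.Chars.strip (PySem.List.pyGetD lines (i + 1) [])).isEmpty
        out ++ [if prevBlank && nextBlank && headTest stripped then '#' :: '#' :: '#' :: ' ' :: stripped else line])
      = fun out p => out ++ [fA lines p] := by
    funext out p
    simp only [fA]
    split <;> rfl
  rw [this, PySem.List.foldl_append_singleton_eq_map]

-- indexed form = structural scan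
lemma mapA (lines pre suf : List (List Char)) (h : lines = pre ++ suf) :
    (PySem.List.enumerate suf (pre.length : Int)).map (fA lines)
      = goA (pre.isEmpty || (PySem.Chars.strip (pre.getLastD [])).isEmpty) suf := by
  induction suf generalizing pre with
  | nil => simp [goA, PySem.List.enumerate]
  | cons l rest IH =>
    rw [PySem.List.enumerate_cons, List.map_cons]
    have tail := IH (pre ++ [l]) (by simp [h])
    have hcast : (pre.length : Int) + 1 = (((pre ++ [l]).length : Int)) := by
      simp
    rw [hcast, tail]
    by_cases hb : (PySem.Chars.strip l).isEmpty
    · simp [fA, hb, goA_cons]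
    · have hprev : (((pre.length : Int) == 0) || (PySem.Chars.strip (PySem.List.pyGetD lines ((pre.length : Int) - 1) [])).isEmpty)
          = (pre.isEmpty || (PySem.Chars.strip (pre.getLastD [])).isEmpty) := by
        rcases List.eq_nil_or_concat pre with rfl | ⟨ps, q, rfl⟩
        · simp
        · simp only [List.concat_eq_append] at h ⊢
          have h0 : ((((ps ++ [q]).length : Int)) == 0) = false := by
            simp only [beq_eq_false_iff_ne, ne_eq, List.length_append, List.length_singleton]
            push_cast
            omega
          have hidx : PySem.List.pyGetD lines (((ps ++ [q]).length : Int) - 1) [] = q := by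
            rw [PySem.List.pyGetD_of_nonneg lines [] (by simp)]
            have ht : ((((ps ++ [q]).length : Int)) - 1).toNat = ps.length := by
              simp only [List.length_append, List.length_singleton]
              omega
            rw [ht, h]
            simp [List.getD_eq_getElem?_getD]
          rw [h0, hidx, List.getLastD_concat]
          simp
      have hnext : (((pre.length : Int) == (lines.length : Int) - 1) || (PySem.Chars.strip (PySem.List.pyGetD lines ((pre.length : Int) + 1) [])).isEmpty)
          = nextFlag rest := by
        cases rest with
        | nil =>
          have h1 : ((pre.length : Int) == (lines.length : Int) - 1) = true := by
            simp [h]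
          simp [h1, nextFlag]
        | cons r rs =>
          have h1 : ((pre.length : Int) == (lines.length : Int) - 1) = false := by
            simp only [h, beq_eq_false_iff_ne, ne_eq, List.length_append, List.length_cons]
            push_cast
            omega
          have hidx : PySem.List.pyGetD lines ((pre.length : Int) + 1) [] = r := by
            rw [PySem.List.pyGetD_of_nonneg lines [] (by omega)]
            have ht : (((pre.length : Int)) + 1).toNat = pre.length + 1 := by omega
            rw [ht, h]
            simp [List.getD_eq_getElem?_getD]
          rw [h1, hidx]
          simp [nextFlag]
      have hfA : fA lines ((pre.length : Int), l)
          = (if (pre.isEmpty || (PySem.Chars.strip (pre.getLastD [])).isEmpty) && nextFlag rest && headTest (PySem.Chars.strip l)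
             then '#' :: '#' :: '#' :: ' ' :: PySem.Chars.strip l else l) := by
        simp only [fA]
        rw [if_neg (by simp [hb])]
        rw [hprev, hnext]
      have hflag : ((pre ++ [l]).isEmpty || (PySem.Chars.strip ((pre ++ [l]).getLastD [])).isEmpty) = false := by
        simpa using hb
      rw [hflag, goA_cons, if_neg (by simpa using hb), hfA]

lemma goA_false_nonblank (l : List Char) (rest : List (List Char))
    (h : (PySem.Chars.strip l).isEmpty = false) :
    goA false (l :: rest) = l :: goA false rest := by
  simp [goA, h]

lemma goB_nil : goB [] = [] := by rw [goB]

lemma goB_cons_blank (l : List Char) (rest : List (List Char))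
    (h : (PySem.Chars.strip l).isEmpty = true) : goB (l :: rest) = l :: goB rest := by
  rw [goB]
  simp [h]

lemma goB_cons_nonblank (l : List Char) (rest : List (List Char))
    (h : (PySem.Chars.strip l).isEmpty = false) :
    goB (l :: rest)
      = (if ((l :: rest).takeWhile pvNonblank).length == 1 then
          [match headingOpt (PySem.Chars.strip l) with
           | some hd => hd
           | none => l]
         else (l :: rest).takeWhile pvNonblank) ++ goB ((l :: rest).dropWhile pvNonblank) := by
  rw [goB]
  simp [h]

lemma goA_false_run : ∀ ys : List (List Char),
    goA false ys = ys.takeWhile pvNonblank ++ goA false (ys.dropWhile pvNonblank) := by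
  intro ys
  induction ys with
  | nil => simp
  | cons y ys IH =>
    by_cases hy : (PySem.Chars.strip y).isEmpty
    · rw [List.takeWhile_cons_of_neg (by simp [pvNonblank, hy]),
        List.dropWhile_cons_of_neg (by simp [pvNonblank, hy])]
      simp
    · rw [goA_false_nonblank y ys (by simpa using hy),
        List.takeWhile_cons_of_pos (by simp [pvNonblank, hy]),
        List.dropWhile_cons_of_pos (by simp [pvNonblank, hy])]
      simp [IH]

lemma goAB_aux : ∀ n (ls : List (List Char)), ls.length < n → goA true ls = goB ls := by
  intro n
  induction n with
  | zero => exact fun ls h => absurd h (Nat.not_lt_zero _)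
  | succ n IH =>
    intro ls hlen
    match ls with
    | [] => rw [goB_nil]; rfl
    | l :: rest =>
      by_cases hb : (PySem.Chars.strip l).isEmpty
      · rw [goA_cons, if_pos hb, goB_cons_blank l rest hb,
          IH rest (by simp at hlen; omega)]
      · match rest with
        | [] =>
          rw [goA_cons, if_neg (by simp [hb]),
            goB_cons_nonblank l [] (by simpa using hb)]
          rw [List.takeWhile_cons_of_pos (by simp [pvNonblank, hb]),
            List.dropWhile_cons_of_pos (by simp [pvNonblank, hb])]
          simp only [List.takeWhile_nil, List.dropWhile_nil, goB_nil]
          by_cases ht : headTest (PySem.Chars.strip l) <;>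
            simp [headingOpt, ht, nextFlag, goA]
        | r :: rs =>
          by_cases hr : (PySem.Chars.strip r).isEmpty
          · -- run of length one followed by a blank line
            rw [goA_cons, if_neg (by simp [hb]),
              goB_cons_nonblank l (r :: rs) (by simpa using hb)]
            rw [List.takeWhile_cons_of_pos (by simp [pvNonblank, hb]),
              List.takeWhile_cons_of_neg (by simp [pvNonblank, hr]),
              List.dropWhile_cons_of_pos (by simp [pvNonblank, hb]),
              List.dropWhile_cons_of_neg (by simp [pvNonblank, hr])]
            rw [goA_cons, if_pos hr, goB_cons_blank r rs hr,
              IH rs (by simp at hlen; omega)]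
            by_cases ht : headTest (PySem.Chars.strip l) <;>
              simp [headingOpt, ht, nextFlag, hr]
          · -- run of length at least two
            rw [goA_cons, if_neg (by simp [hb]),
              goB_cons_nonblank l (r :: rs) (by simpa using hb)]
            rw [List.takeWhile_cons_of_pos (by simp [pvNonblank, hb]),
              List.takeWhile_cons_of_pos (by simp [pvNonblank, hr]),
              List.dropWhile_cons_of_pos (by simp [pvNonblank, hb]),
              List.dropWhile_cons_of_pos (by simp [pvNonblank, hr])]
            rw [goA_false_run (r :: rs),
              List.takeWhile_cons_of_pos (by simp [pvNonblank, hr]),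
              List.dropWhile_cons_of_pos (by simp [pvNonblank, hr])]
            have hd : goA false (rs.dropWhile pvNonblank) = goB (rs.dropWhile pvNonblank) := by
              rcases hdw : rs.dropWhile pvNonblank with _ | ⟨z, zs⟩
              · rw [goB_nil]; rfl
              · have hz : pvNonblank z = false := by
                  have h3 := List.head_dropWhile_not pvNonblank (l := rs) (by rw [hdw]; simp)
                  simp only [hdw, List.head_cons] at h3
                  exact h3
                have hzb : (PySem.Chars.strip z).isEmpty = true := by
                  simpa [pvNonblank] using hz
                have hlt : zs.length < n := by
                  have h1 := List.length_dropWhile_le pvNonblank rs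
                  rw [hdw] at h1
                  simp at h1 hlen
                  omega
                rw [goA_cons, if_pos hzb, goB_cons_blank z zs hzb, IH zs hlt]
            rw [hd]
            simp [nextFlag, hr]

lemma goAB (ls : List (List Char)) : goA true ls = goB ls :=
  goAB_aux (ls.length + 1) ls (Nat.lt_succ_self _)

-- ===== VERDICT (by name: the statement is the Claim_ definition above) =====
theorem promote_headings_spec : Claim_equal_promote_headings := by
  intro text _
  show promote_headings text = promote_headings_alt text
  have h0 := mapA (PySem.Chars.splitOn text.toList ['\n']) [] (PySem.Chars.splitOn text.toList ['\n']) rfl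
  simp only [List.length_nil, Nat.cast_zero, List.isEmpty_nil, Bool.true_or] at h0
  simp only [promote_headings, promote_headings_alt, foldA_eq, List.nil_append, h0, goAB]
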